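-- pv_equiv track=rewrite | github.com/gh0stintheshe11/LeetCode-Solutions | solutions/2015.average-height-of-buildings-in-each-segment/Python3.py | averageHeightOfBuildings
-- ===== SOURCE A (Python) =====
-- from typing import List
--
-- def averageHeightOfBuildings(buildings: List[List[int]]) -> List[List[int]]:
--     events = []
--     for start, end, height in buildings:
--         events.append((start, height))
--         events.append((end, -height))
--
--     events.sort()
--
--     current_sum = 0
--     current_count = 0
--     last_position = 0
--     result = []
--
--     for position, height_change in events:
--         if current_count > 0 and position > last_position:
--             avg_height = current_sum // current_count
--             if result and result[-1][1] == last_position and result[-1][2] == avg_height: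
--                 result[-1][1] = position
--             else:
--                 result.append([last_position, position, avg_height])
--
--         current_sum += height_change
--         if height_change > 0:
--             current_count += 1
--         else:
--             current_count -= 1
--
--         last_position = position
--
--     return result
-- ===== SOURCE B (Python) =====
-- from typing import List
--
-- # Bucket the height/count deltas per coordinate in a dict, prefix-scan the sorted
-- # coordinates emitting raw segments, then merge equal-average neighbours in a second pass.
-- def averageHeightOfBuildings(buildings: List[List[int]]) -> List[List[int]]:
--     deltas = {}
--     for s, e, h in buildings:
--         for pos, change in ((s, h), (e, -h)):
--             d = deltas.setdefault(pos, [0, 0])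
--             d[0] += change
--             d[1] += 1 if change > 0 else -1
--     positions = sorted(deltas)
--     total = count = 0
--     segments = []
--     for lo, hi in zip(positions, positions[1:]):
--         total += deltas[lo][0]
--         count += deltas[lo][1]
--         if count > 0:
--             segments.append([lo, hi, total // count])
--     merged = []
--     for lo, hi, avg in segments:
--         if merged and merged[-1][1] == lo and merged[-1][2] == avg:
--             merged[-1][1] = hi
--         else:
--             merged.append([lo, hi, avg])
--     return merged
-- ===== Notes on version B (the rewrite author's own statement) =====
-- stated objective: alternative
-- what changed: Replaces A's single sorted-event sweep carrying running state and merging in-loop with three separate phases: bucket the per-coordinate height/count deltas in a dict, prefix-scan the sorted distinct coordinates emitting raw segments, then merge equal-average adjacent segments in a second pass; Pre_ excludes only rows whose length is not 3, on which A raises ValueError during tuple unpacking.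
import Mathlib
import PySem

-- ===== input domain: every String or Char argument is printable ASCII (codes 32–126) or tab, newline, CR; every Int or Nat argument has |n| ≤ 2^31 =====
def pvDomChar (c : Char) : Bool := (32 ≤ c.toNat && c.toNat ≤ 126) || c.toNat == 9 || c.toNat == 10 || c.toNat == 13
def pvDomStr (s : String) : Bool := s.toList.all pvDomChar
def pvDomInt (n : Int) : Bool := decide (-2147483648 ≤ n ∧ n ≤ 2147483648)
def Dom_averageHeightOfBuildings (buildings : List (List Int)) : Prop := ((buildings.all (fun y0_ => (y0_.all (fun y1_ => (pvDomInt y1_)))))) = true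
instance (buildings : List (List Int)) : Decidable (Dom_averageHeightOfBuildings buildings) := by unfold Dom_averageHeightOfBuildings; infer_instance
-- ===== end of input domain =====

-- B buckets per-coordinate deltas in a dict, prefix-scans the sorted coordinates into raw
-- segments and merges equal-average neighbours in a second pass (alternative algorithm).

-- ===== PORT A =====
-- result[-1] access / `result` truthiness = getLast?; result[-1][1] = position is pySetD row 1 position
def pvPushA (res : List (List Int)) (lo hi avg : Int) : List (List Int) :=
  match res.getLast? with
  | some row =>
    if PySem.List.pyGetD row 1 0 = lo ∧ PySem.List.pyGetD row 2 0 = avg then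
      res.dropLast ++ [PySem.List.pySetD row 1 hi]
    else res ++ [[lo, hi, avg]]
  | none => res ++ [[lo, hi, avg]]

def pvStepA (st : Int × Int × Int × List (List Int)) (ev : Int × Int) :
    Int × Int × Int × List (List Int) :=
  let result :=
    if st.2.1 > 0 ∧ ev.1 > st.2.2.1 then
      pvPushA st.2.2.2 st.2.2.1 ev.1 (PySem.Int.floordiv st.1 st.2.1)
    else st.2.2.2
  (st.1 + ev.2, st.2.1 + (if ev.2 > 0 then 1 else -1), ev.1, result)

-- rows not of length 3 raise in Python (excluded by Pre_); the fold skips them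
def pvEventsA (bs : List (List Int)) : List (Int × Int) :=
  bs.foldl (fun ev row =>
    match row with
    | [s, e, h] => ev ++ [(s, h), (e, -h)]
    | _ => ev) []

def averageHeightOfBuildings (buildings : List (List Int)) : List (List Int) :=
  let events := PySem.List.sorted2 (pvEventsA buildings) Prod.fst Prod.snd
  (events.foldl pvStepA (0, 0, 0, [])).2.2.2

-- ===== PORT B =====
def pvDeltaStep (dd : PySem.Dict Int (Int × Int)) (pc : Int × Int) : PySem.Dict Int (Int × Int) :=
  dd.modify pc.1 (0, 0) (fun cur => (cur.1 + pc.2, cur.2 + (if pc.2 > 0 then 1 else -1)))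

-- rows not of length 3 raise in Python (excluded by Pre_); the fold skips them
def pvDeltasB (bs : List (List Int)) : PySem.Dict Int (Int × Int) :=
  bs.foldl (fun dd row =>
    match row with
    | [s, e, h] => [(s, h), (e, -h)].foldl pvDeltaStep dd
    | _ => dd) PySem.Dict.empty

def pvGapStepB (deltas : PySem.Dict Int (Int × Int))
    (st : Int × Int × List (List Int)) (g : Int × Int) : Int × Int × List (List Int) :=
  let d := deltas.getD g.1 (0, 0)
  let total := st.1 + d.1
  let count := st.2.1 + d.2
  (total, count,
    if count > 0 then st.2.2 ++ [[g.1, g.2, PySem.Int.floordiv total count]] else st.2.2)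

-- merged[-1] access / `merged` truthiness = getLast?; merged[-1][1] = hi is pySetD row 1 hi;
-- the `for lo, hi, avg in segments` unpacking only ever sees the 3-lists built above
def pvMergeStepB (merged : List (List Int)) (row : List Int) : List (List Int) :=
  match row with
  | [lo, hi, avg] =>
    (match merged.getLast? with
     | some last =>
       if PySem.List.pyGetD last 1 0 = lo ∧ PySem.List.pyGetD last 2 0 = avg then
         merged.dropLast ++ [PySem.List.pySetD last 1 hi]
       else merged ++ [[lo, hi, avg]]
     | none => merged ++ [[lo, hi, avg]])
  | _ => merged

def averageHeightOfBuildings_alt (buildings : List (List Int)) : List (List Int) :=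
  let deltas := pvDeltasB buildings
  let positions := PySem.List.sorted deltas.keys (fun x => x)
  let segments := ((positions.zip positions.tail).foldl (pvGapStepB deltas) (0, 0, [])).2.2
  segments.foldl pvMergeStepB []

-- ===== PRECONDITION & SPEC =====
-- Pre_ excludes only inputs where Python A raises: a row whose length is not 3 fails tuple unpacking (ValueError).
def Pre_averageHeightOfBuildings (buildings : List (List Int)) : Prop :=
  ∀ row ∈ buildings, row.length = 3
instance (buildings : List (List Int)) : Decidable (Pre_averageHeightOfBuildings buildings) := by
  unfold Pre_averageHeightOfBuildings; infer_instance

def pvWitness_averageHeightOfBuildings : List (List Int) := [[0, 3, 2], [1, 4, 4]]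

def Spec_averageHeightOfBuildings (buildings : List (List Int)) (out : List (List Int)) : Prop := out = averageHeightOfBuildings_alt buildings
instance (buildings : List (List Int)) (out : List (List Int)) : Decidable (Spec_averageHeightOfBuildings buildings out) := by unfold Spec_averageHeightOfBuildings; infer_instance

-- ===== CLAIM (what is proved, stated in full; the proofs are below) =====
def Claim_equal_averageHeightOfBuildings : Prop := ∀ (buildings : List (List Int)), Dom_averageHeightOfBuildings buildings → Pre_averageHeightOfBuildings buildings → Spec_averageHeightOfBuildings buildings (averageHeightOfBuildings buildings)

-- ===== LEMMAS AND PROOFS =====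

-- count / sum contribution of a list of events
def pvC (l : List (Int × Int)) : Int := (l.map (fun e => if e.2 > 0 then (1 : Int) else -1)).sum
def pvS (l : List (Int × Int)) : Int := (l.map Prod.snd).sum

def pvEmit (S C last p : Int) (res : List (List Int)) : List (List Int) :=
  if C > 0 ∧ p > last then pvPushA res last p (PySem.Int.floordiv S C) else res

-- A's sweep, regrouped: one step per distinct position
def pvWalkGaps : List (Int × Int) → Int → Int → Int → List (List Int) → List (List Int)
  | [], _, _, _, res => res
  | (p, d) :: t, S, C, last, res =>
      pvWalkGaps (t.dropWhile (fun e => e.1 == p))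
        (S + pvS ((p, d) :: t.takeWhile (fun e => e.1 == p)))
        (C + pvC ((p, d) :: t.takeWhile (fun e => e.1 == p)))
        p (pvEmit S C last p res)
  termination_by l => l.length
  decreasing_by
    have := List.length_dropWhile_le (fun e => e.1 == p) t
    simp; omega

-- the distinct positions, in order of appearance
def pvPosList : List (Int × Int) → List Int
  | [] => []
  | (p, _) :: t => p :: pvPosList (t.dropWhile (fun e => e.1 == p))
  termination_by l => l.length
  decreasing_by
    have := List.length_dropWhile_le (fun e => e.1 == p) t
    simp; omega

-- B's gap loop, with the per-gap state written as a prefix sum over a fixed event list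
def pvGapStep (all : List (Int × Int)) (res : List (List Int)) (g : Int × Int) :
    List (List Int) :=
  if pvC (all.filter (fun e => e.1 ≤ g.1)) > 0 then
    pvPushA res g.1 g.2
      (PySem.Int.floordiv (pvS (all.filter (fun e => e.1 ≤ g.1)))
        (pvC (all.filter (fun e => e.1 ≤ g.1))))
  else res

def pvGapLoop (all : List (Int × Int)) (gaps : List (Int × Int)) (res : List (List Int)) :
    List (List Int) :=
  gaps.foldl (pvGapStep all) res

theorem pvGroup_foldl (grp : List (Int × Int)) (p : Int) (hg : ∀ e ∈ grp, e.1 = p) :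
    ∀ S C res, (grp.foldl pvStepA (S, C, p, res)) = (S + pvS grp, C + pvC grp, p, res) := by
  induction grp with
  | nil => intro S C res; simp [pvS, pvC]
  | cons e t ih =>
    intro S C res
    have hep : e.1 = p := hg e (by simp)
    have ht : ∀ x ∈ t, x.1 = p := fun x hx => hg x (by simp [hx])
    simp only [List.foldl_cons]
    have hstep : pvStepA (S, C, p, res) e = (S + e.2, C + (if e.2 > 0 then 1 else -1), p, res) := by
      simp [pvStepA, hep]
    rw [hstep, ih ht]
    simp [pvS, pvC]; constructor <;> ring

theorem pvWalkGaps_eq_foldl (n : Nat) :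
    ∀ evs : List (Int × Int), evs.length ≤ n → ∀ S C last res,
      (evs.foldl pvStepA (S, C, last, res)).2.2.2 = pvWalkGaps evs S C last res := by
  induction n with
  | zero =>
    intro evs h S C last res
    have : evs = [] := List.eq_nil_of_length_eq_zero (Nat.le_zero.mp h)
    subst this; simp [pvWalkGaps]
  | succ n ih =>
    intro evs h S C last res
    match evs with
    | [] => simp [pvWalkGaps]
    | (p, d) :: t =>
      have hsplit := List.takeWhile_append_dropWhile (p := fun e => e.1 == p) (l := t)
      set tw := t.takeWhile (fun e => e.1 == p) with htw
      set dw := t.dropWhile (fun e => e.1 == p) with hdw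
      have hstep : pvStepA (S, C, last, res) (p, d) =
          (S + d, C + (if d > 0 then 1 else -1), p, pvEmit S C last p res) := by
        simp [pvStepA, pvEmit]
      have htwp : ∀ e ∈ tw, e.1 = p := by
        intro e he
        have := List.mem_takeWhile_imp he
        simpa using this
      have hlen : dw.length ≤ n := by
        have h1 : dw.length ≤ t.length := by
          rw [hdw]; exact List.length_dropWhile_le _ t
        simp at h
        omega
      calc (((p, d) :: t).foldl pvStepA (S, C, last, res)).2.2.2
          = ((tw ++ dw).foldl pvStepA (S + d, C + (if d > 0 then 1 else -1), p, pvEmit S C last p res)).2.2.2 := by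
            rw [← hsplit]; simp only [List.foldl_cons, hstep]
        _ = (dw.foldl pvStepA (S + d + pvS tw, C + (if d > 0 then 1 else -1) + pvC tw, p, pvEmit S C last p res)).2.2.2 := by
            rw [List.foldl_append, pvGroup_foldl tw p htwp]
        _ = pvWalkGaps dw (S + pvS ((p, d) :: tw)) (C + pvC ((p, d) :: tw)) p (pvEmit S C last p res) := by
            rw [ih dw hlen]
            congr 1 <;> simp [pvS, pvC] <;> ring
        _ = pvWalkGaps ((p, d) :: t) S C last res := by
            rw [pvWalkGaps]

-- positions after dropping the p-group are strictly above p
theorem pv_dropWhile_gt (p : Int) :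
    ∀ t : List (Int × Int), (t.map Prod.fst).Pairwise (· ≤ ·) → (∀ x ∈ t, p ≤ x.1) →
      ∀ e ∈ t.dropWhile (fun e => e.1 == p), p < e.1 := by
  intro t
  induction t with
  | nil => simp
  | cons a t ih =>
    intro hpw hge e he
    by_cases hap : a.1 == p
    · simp only [List.dropWhile_cons, if_pos hap] at he
      exact ih (by simpa using hpw.sublist ((List.sublist_cons_self a t).map Prod.fst))
        (fun x hx => hge x (by simp [hx])) e he
    · simp only [List.dropWhile_cons, if_neg hap] at he
      have hne : a.1 ≠ p := by simpa using hap
      have hpa : p < a.1 := lt_of_le_of_ne (hge a (List.mem_cons_self ..)) (Ne.symm hne)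
      rw [List.map_cons, List.pairwise_cons] at hpw
      rcases List.mem_cons.mp he with rfl | he
      · omega
      · have : a.1 ≤ e.1 := hpw.1 e.1 (List.mem_map_of_mem he)
        omega

theorem pv_mem_posList : ∀ (l : List (Int × Int)) (x : Int),
    x ∈ pvPosList l ↔ x ∈ l.map Prod.fst := by
  intro l
  induction hn : l.length using Nat.strong_induction_on generalizing l with
  | _ n ih =>
    match l with
    | [] => simp [pvPosList]
    | (p, d) :: t =>
      intro x
      have hsplit := List.takeWhile_append_dropWhile (p := fun e => e.1 == p) (l := t)
      have hlen : (t.dropWhile (fun e => e.1 == p)).length < n := by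
        have := List.length_dropWhile_le (fun e => e.1 == p) t
        simp at hn; omega
      rw [pvPosList]
      simp only [List.mem_cons, ih _ hlen _ rfl x, List.map_cons, List.mem_map]
      constructor
      · rintro (rfl | ⟨e, he, rfl⟩)
        · exact Or.inl rfl
        · exact Or.inr ⟨e, (List.dropWhile_sublist _).mem he, rfl⟩
      · rintro (rfl | ⟨e, he, rfl⟩)
        · exact Or.inl rfl
        · rw [← hsplit] at he
          rcases List.mem_append.mp he with he | he
          · exact Or.inl (by simpa using (List.mem_takeWhile_imp he))
          · exact Or.inr ⟨e, he, rfl⟩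

theorem pv_pairwise_posList : ∀ (l : List (Int × Int)),
    (l.map Prod.fst).Pairwise (· ≤ ·) → (pvPosList l).Pairwise (· < ·) := by
  intro l
  induction hn : l.length using Nat.strong_induction_on generalizing l with
  | _ n ih =>
    match l with
    | [] => intro _; simp [pvPosList]
    | (p, d) :: t =>
      intro hpw
      have hlen : (t.dropWhile (fun e => e.1 == p)).length < n := by
        have := List.length_dropWhile_le (fun e => e.1 == p) t
        simp at hn; omega
      have hpwt : (t.map Prod.fst).Pairwise (· ≤ ·) :=
        (List.pairwise_cons.mp (by simpa using hpw)).2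
      have hget : ∀ x ∈ t, p ≤ x.1 := by
        intro x hx
        exact (List.pairwise_cons.mp (by simpa using hpw)).1 x.1 (List.mem_map_of_mem hx)
      have hgt := pv_dropWhile_gt p t hpwt hget
      rw [pvPosList]
      refine List.pairwise_cons.mpr ⟨?_, ?_⟩
      · intro x hx
        obtain ⟨e, he, rfl⟩ := List.mem_map.mp ((pv_mem_posList _ x).mp hx)
        exact hgt e he
      · exact ih _ hlen _ rfl (by
          simpa using hpwt.sublist ((List.dropWhile_sublist _).map Prod.fst))

theorem pvC_append (l1 l2 : List (Int × Int)) : pvC (l1 ++ l2) = pvC l1 + pvC l2 := by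
  simp [pvC]
theorem pvS_append (l1 l2 : List (Int × Int)) : pvS (l1 ++ l2) = pvS l1 + pvS l2 := by
  simp [pvS]

theorem pvWalkGaps_eq_gapLoop (n : Nat) :
    ∀ evs : List (Int × Int), evs.length ≤ n →
    ∀ (done : List (Int × Int)) (S C last : Int) (res : List (List Int)),
      ((done ++ evs).map Prod.fst).Pairwise (· ≤ ·) →
      (∀ e ∈ done, e.1 ≤ last) → (∀ f ∈ evs, last < f.1) →
      S = pvS done → C = pvC done →
      pvWalkGaps evs S C last res =
        pvGapLoop (done ++ evs) ((last :: pvPosList evs).zip (pvPosList evs)) res := by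
  induction n with
  | zero =>
    intro evs h done S C last res _ _ _ _ _
    have : evs = [] := List.eq_nil_of_length_eq_zero (Nat.le_zero.mp h)
    subst this; simp [pvWalkGaps, pvPosList, pvGapLoop]
  | succ n ih =>
    intro evs h done S C last res hpw hdone hevs hS hC
    match evs with
    | [] => simp [pvWalkGaps, pvPosList, pvGapLoop]
    | (p, d) :: t =>
      have hsplit := List.takeWhile_append_dropWhile (p := fun e => e.1 == p) (l := t)
      set tw := t.takeWhile (fun e => e.1 == p) with htw
      set dw := t.dropWhile (fun e => e.1 == p) with hdw
      have hlen : dw.length ≤ n := by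
        have h1 : dw.length ≤ t.length := by
          rw [hdw]; exact List.length_dropWhile_le _ t
        simp at h; omega
      have htwp : ∀ e ∈ tw, e.1 = p := by
        intro e he; simpa using List.mem_takeWhile_imp he
      have hlastp : last < p := hevs (p, d) (List.mem_cons_self ..)
      -- the first gap's filter picks out exactly `done`
      have hfilter : (done ++ (p, d) :: t).filter (fun e => e.1 ≤ last) = done := by
        rw [List.filter_append]
        have h1 : done.filter (fun e => e.1 ≤ last) = done :=
          List.filter_eq_self.mpr (fun e he => by simpa using hdone e he)
        have h2 : ((p, d) :: t).filter (fun e => e.1 ≤ last) = [] :=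
          List.filter_eq_nil_iff.mpr (fun e he => by
            have := hevs e he; simpa using by omega)
        rw [h1, h2, List.append_nil]
      -- structure for the recursive call
      have hpwevs : (((p, d) :: t).map Prod.fst).Pairwise (· ≤ ·) :=
        (List.pairwise_append.mp (by rw [← List.map_append]; exact hpw)).2.1
      have hpwt : (t.map Prod.fst).Pairwise (· ≤ ·) :=
        (List.pairwise_cons.mp (by simpa using hpwevs)).2
      have hget : ∀ x ∈ t, p ≤ x.1 := fun x hx =>
        (List.pairwise_cons.mp (by simpa using hpwevs)).1 x.1 (List.mem_map_of_mem hx)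
      have hgt : ∀ e ∈ dw, p < e.1 := by
        rw [hdw]; exact pv_dropWhile_gt p t hpwt hget
      have hassoc : done ++ (p, d) :: t = (done ++ (p, d) :: tw) ++ dw := by
        rw [List.append_assoc]; simp [htw, hdw]
      have hdone' : ∀ e ∈ done ++ (p, d) :: tw, e.1 ≤ p := by
        intro e he
        rcases List.mem_append.mp he with he | he
        · exact le_of_lt (lt_of_le_of_lt (hdone e he) hlastp)
        · rcases List.mem_cons.mp he with rfl | he
          · exact le_refl _
          · exact le_of_eq (htwp e he)
      have hpw' : (((done ++ (p, d) :: tw) ++ dw).map Prod.fst).Pairwise (· ≤ ·) := by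
        rw [← hassoc]; exact hpw
      have hS' : S + pvS ((p, d) :: tw) = pvS (done ++ (p, d) :: tw) := by
        rw [pvS_append, hS]
      have hC' : C + pvC ((p, d) :: tw) = pvC (done ++ (p, d) :: tw) := by
        rw [pvC_append, hC]
      have hrec := ih dw hlen (done ++ (p, d) :: tw)
        (S + pvS ((p, d) :: tw)) (C + pvC ((p, d) :: tw)) p (pvEmit S C last p res)
        hpw' hdone' hgt hS' hC'
      rw [pvWalkGaps, pvPosList]
      rw [← htw, ← hdw]
      have hzip : ((last :: p :: pvPosList dw).zip (p :: pvPosList dw))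
          = (last, p) :: ((p :: pvPosList dw).zip (pvPosList dw)) := rfl
      rw [hzip]
      have hstep : pvGapLoop (done ++ (p, d) :: t)
            ((last, p) :: ((p :: pvPosList dw).zip (pvPosList dw))) res
          = pvGapLoop (done ++ (p, d) :: t) ((p :: pvPosList dw).zip (pvPosList dw))
              (pvEmit S C last p res) := by
        unfold pvGapLoop
        rw [List.foldl_cons]
        congr 1
        unfold pvGapStep
        simp only [hfilter]
        rw [pvEmit, hS, hC]
        have : (pvC done > 0 ∧ p > last) ↔ pvC done > 0 := by
          constructor
          · exact fun h => h.1
          · exact fun h => ⟨h, hlastp⟩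
        simp only [this]
      rw [hstep, hrec, hassoc]

def pvEvRow (row : List Int) : List (Int × Int) :=
  match row with | [s, e, h] => [(s, h), (e, -h)] | _ => []

theorem pvEventsA_eq (bs : List (List Int)) : pvEventsA bs = bs.flatMap pvEvRow := by
  unfold pvEventsA
  have : (fun (ev : List (Int × Int)) (row : List Int) =>
      match row with | [s, e, h] => ev ++ [(s, h), (e, -h)] | _ => ev)
      = fun ev row => ev ++ pvEvRow row := by
    funext ev row
    rcases row with _ | ⟨s, _ | ⟨e, _ | ⟨h, _ | _⟩⟩⟩ <;> simp [pvEvRow]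
  rw [this, PySem.List.foldl_append_eq_flatMap]
  simp

-- == the delta dict: a single fold over the event list ==
theorem pvDeltasB_eq (bs : List (List Int)) :
    pvDeltasB bs = (bs.flatMap pvEvRow).foldl pvDeltaStep PySem.Dict.empty := by
  unfold pvDeltasB
  suffices h : ∀ d, bs.foldl (fun dd row =>
      match row with
      | [s, e, h] => [(s, h), (e, -h)].foldl pvDeltaStep dd
      | _ => dd) d = (bs.flatMap pvEvRow).foldl pvDeltaStep d from h _
  induction bs with
  | nil => intro d; simp
  | cons row bs ih =>
    intro d
    rw [List.foldl_cons, List.flatMap_cons, List.foldl_append, ih]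
    rcases row with _ | ⟨s, _ | ⟨e, _ | ⟨h, _ | _⟩⟩⟩ <;> simp [pvEvRow]

theorem pvDeltaFold_getD (l : List (Int × Int)) :
    ∀ (d : PySem.Dict Int (Int × Int)) (k : Int),
      (l.foldl pvDeltaStep d).getD k (0, 0)
        = ((d.getD k (0, 0)).1 + pvS (l.filter (fun e => e.1 = k)),
           (d.getD k (0, 0)).2 + pvC (l.filter (fun e => e.1 = k))) := by
  induction l with
  | nil => intro d k; simp [pvS, pvC]
  | cons pc t ih =>
    intro d k
    rw [List.foldl_cons, ih]
    unfold pvDeltaStep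
    rw [PySem.Dict.getD_modify]
    by_cases hk : pc.1 = k
    · rw [if_pos hk.symm]
      simp only [List.filter_cons, decide_eq_true_eq, hk]
      simp [pvS, pvC]; constructor <;> ring
    · rw [if_neg (fun hc => hk hc.symm)]
      simp only [List.filter_cons, decide_eq_true_eq, if_neg hk]

theorem pvDeltaFold_mem_keys (l : List (Int × Int)) :
    ∀ (d : PySem.Dict Int (Int × Int)) (k : Int),
      k ∈ (l.foldl pvDeltaStep d).keys ↔ k ∈ d.keys ∨ k ∈ l.map Prod.fst := by
  induction l with
  | nil => intro d k; simp
  | cons pc t ih =>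
    intro d k
    rw [List.foldl_cons, ih]
    have hm : k ∈ (pvDeltaStep d pc).keys ↔ k = pc.1 ∨ k ∈ d.keys := by
      simp [pvDeltaStep, PySem.Dict.modify, PySem.Dict.mem_keys_insert]
    rw [hm]
    simp only [List.map_cons, List.mem_cons]
    tauto

theorem pvDeltaFold_nodup_keys (l : List (Int × Int)) :
    (l.foldl pvDeltaStep PySem.Dict.empty).keys.Nodup := by
  have h := PySem.Dict.nodup_keys_foldl_modify_key l Prod.fst ((0, 0) : Int × Int)
    (fun _ pc cur => (cur.1 + pc.2, cur.2 + (if pc.2 > 0 then 1 else -1)))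
    PySem.Dict.empty (by simp)
  exact h

-- == the raw segments A and B both produce, as gap triples ==
def pvTriples (all : List (Int × Int)) (gaps : List (Int × Int)) : List (Int × Int × Int) :=
  gaps.filterMap (fun g =>
    if pvC (all.filter (fun e => e.1 ≤ g.1)) > 0 then
      some (g.1, g.2, PySem.Int.floordiv (pvS (all.filter (fun e => e.1 ≤ g.1)))
        (pvC (all.filter (fun e => e.1 ≤ g.1))))
    else none)

theorem pvGapLoop_eq_push (all : List (Int × Int)) :
    ∀ (gaps : List (Int × Int)) (res : List (List Int)),
      pvGapLoop all gaps res
        = (pvTriples all gaps).foldl (fun r t => pvPushA r t.1 t.2.1 t.2.2) res := by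
  intro gaps
  induction gaps with
  | nil => intro res; simp [pvGapLoop, pvTriples]
  | cons g gaps ih =>
    intro res
    unfold pvGapLoop pvTriples at *
    rw [List.foldl_cons, List.filterMap_cons]
    by_cases hc : pvC (all.filter (fun e => e.1 ≤ g.1)) > 0
    · rw [if_pos hc, List.foldl_cons, ← ih]
      unfold pvGapStep
      rw [if_pos hc]
    · rw [if_neg hc, ← ih]
      unfold pvGapStep
      rw [if_neg hc]

-- sums over a filter by two mutually exclusive predicates add up
theorem pv_sum_filter_or (f : (Int × Int) → Int) (p q : (Int × Int) → Bool)
    (hpq : ∀ x, ¬(p x = true ∧ q x = true)) :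
    ∀ l : List (Int × Int),
      ((l.filter (fun x => p x || q x)).map f).sum
        = ((l.filter p).map f).sum + ((l.filter q).map f).sum := by
  intro l
  induction l with
  | nil => simp
  | cons x t ih =>
    simp only [List.filter_cons]
    cases hp : p x <;> cases hq : q x
    · simp only [Bool.false_or]
      simp [ih]
    · simp only [Bool.false_or]
      simp [ih]; ring
    · simp only [Bool.true_or]
      simp [ih]; ring
    · exact absurd ⟨hp, hq⟩ (hpq x)

-- == B's prefix scan over the sorted positions produces exactly the gap triples ==
theorem pvBGaps_eq (all : List (Int × Int)) (D : Int → Int × Int)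
    (hD : ∀ k, D k = (pvS (all.filter (fun e => e.1 = k)), pvC (all.filter (fun e => e.1 = k)))) :
    ∀ (ps done : List Int) (S C : Int) (segs : List (List Int)),
      (done ++ ps).Pairwise (· < ·) →
      (∀ e ∈ all, e.1 ∈ done ++ ps) →
      S = pvS (all.filter (fun e => decide (e.1 ∈ done))) →
      C = pvC (all.filter (fun e => decide (e.1 ∈ done))) →
      ((ps.zip ps.tail).foldl
          (fun st g =>
            let d := D g.1
            let total := st.1 + d.1
            let count := st.2.1 + d.2
            (total, count,
              if count > 0 then st.2.2 ++ [[g.1, g.2, PySem.Int.floordiv total count]] else st.2.2))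
          (S, C, segs)).2.2
        = segs ++ (pvTriples all (ps.zip ps.tail)).map (fun t => [t.1, t.2.1, t.2.2]) := by
  intro ps
  induction ps with
  | nil => intro done S C segs _ _ _ _; simp [pvTriples]
  | cons lo ps ih =>
    match ps, ih with
    | [], _ => intro done S C segs _ _ _ _; simp [pvTriples]
    | hi :: rest, ih =>
      intro done S C segs hpw hmem hS hC
      have hdlt : ∀ x ∈ done, x < lo := by
        intro x hx
        exact (List.pairwise_append.mp hpw).2.2 x hx lo (List.mem_cons_self ..)
      have hlt : ∀ x ∈ hi :: rest, lo < x := by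
        intro x hx
        have := (List.pairwise_append.mp hpw).2.1
        exact (List.pairwise_cons.mp this).1 x hx
      -- the filter over done ++ [lo] is the filter ≤ lo
      have hfeq : all.filter (fun e => decide (e.1 ∈ done ++ [lo])) = all.filter (fun e => e.1 ≤ lo) := by
        apply List.filter_congr
        intro e he
        have hmem' := hmem e he
        simp only [List.mem_append, List.mem_singleton, decide_eq_decide]
        constructor
        · rintro (h | rfl)
          · exact le_of_lt (hdlt _ h)
          · exact le_refl _
        · intro h
          rcases List.mem_append.mp hmem' with h' | h'
          · exact Or.inl h'
          · rcases List.mem_cons.mp h' with rfl | h'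
            · exact Or.inr rfl
            · exact absurd (hlt _ h') (by omega)
      have hsplitS : S + (D lo).1 = pvS (all.filter (fun e => e.1 ≤ lo)) := by
        rw [hD, hS, ← hfeq]
        have := pv_sum_filter_or Prod.snd (fun e => decide (e.1 ∈ done)) (fun e => decide (e.1 = lo))
          (by intro x hx; simp at hx; exact absurd (hdlt _ (hx.2 ▸ hx.1)) (by omega)) all
        unfold pvS
        rw [show (fun (e : Int × Int) => decide (e.1 ∈ done ++ [lo]))
            = (fun e => decide (e.1 ∈ done) || decide (e.1 = lo)) by
          funext e; simp [List.mem_append]]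
        exact this.symm
      have hsplitC : C + (D lo).2 = pvC (all.filter (fun e => e.1 ≤ lo)) := by
        rw [hD, hC, ← hfeq]
        have := pv_sum_filter_or (fun e => if e.2 > 0 then (1 : Int) else -1)
          (fun e => decide (e.1 ∈ done)) (fun e => decide (e.1 = lo))
          (by intro x hx; simp at hx; exact absurd (hdlt _ (hx.2 ▸ hx.1)) (by omega)) all
        unfold pvC
        rw [show (fun (e : Int × Int) => decide (e.1 ∈ done ++ [lo]))
            = (fun e => decide (e.1 ∈ done) || decide (e.1 = lo)) by
          funext e; simp [List.mem_append]]
        exact this.symm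
      have hrec := ih (done ++ [lo]) (S + (D lo).1) (C + (D lo).2)
        (if C + (D lo).2 > 0 then
           segs ++ [[lo, hi, PySem.Int.floordiv (S + (D lo).1) (C + (D lo).2)]] else segs)
        (by
          have hpl : (done ++ [lo]) ++ hi :: rest = done ++ lo :: hi :: rest := by simp
          rw [hpl]; exact hpw)
        (by
          intro e he
          have hpl : (done ++ [lo]) ++ hi :: rest = done ++ lo :: hi :: rest := by simp
          rw [hpl]; exact hmem e he)
        (by rw [hsplitS, hfeq]) (by rw [hsplitC, hfeq])
      have hzip : ((lo :: hi :: rest).zip (lo :: hi :: rest).tail)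
          = (lo, hi) :: ((hi :: rest).zip (hi :: rest).tail) := rfl
      rw [hzip, List.foldl_cons]
      simp only []
      rw [hrec]
      unfold pvTriples
      rw [List.filterMap_cons]
      by_cases hpos : C + (D lo).2 > 0
      · rw [if_pos hpos, if_pos (by rw [← hsplitC]; exact hpos)]
        rw [List.map_cons, ← hsplitS, ← hsplitC]
        simp
      · rw [if_neg hpos, if_neg (by rw [← hsplitC]; exact hpos)]

-- the merge pass over literal 3-element rows is the pvPushA fold over triples
theorem pvMerge_eq_push (ts : List (Int × Int × Int)) :
    ∀ res, (ts.map (fun t => [t.1, t.2.1, t.2.2])).foldl pvMergeStepB res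
      = ts.foldl (fun r t => pvPushA r t.1 t.2.1 t.2.2) res := by
  induction ts with
  | nil => intro res; simp
  | cons t ts ih =>
    intro res
    rw [List.map_cons, List.foldl_cons, List.foldl_cons, ← ih]
    rfl

-- Python's lexicographic tuple-< used by sorted2 on pairs
def pvBefore (a b : Int × Int) : Bool :=
  decide (a.1 < b.1) || (!decide (b.1 < a.1) && decide (a.2 < b.2))

theorem pvBefore_asymm (a b : Int × Int) (h : pvBefore a b = true) : pvBefore b a = false := by
  simp [pvBefore] at *; omega

theorem pvBefore_negtrans (a b c : Int × Int)
    (h1 : pvBefore b a = false) (h2 : pvBefore c b = false) : pvBefore c a = false := by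
  simp [pvBefore] at *; omega

theorem pv_insertBy_pairwise (x : Int × Int) (ys : List (Int × Int))
    (h : ys.Pairwise (fun a b => pvBefore b a = false)) :
    (PySem.List.insertBy pvBefore x ys).Pairwise (fun a b => pvBefore b a = false) := by
  induction ys with
  | nil => simp [PySem.List.insertBy]
  | cons y ys ih =>
    rw [List.pairwise_cons] at h
    by_cases hxy : pvBefore x y
    · rw [show PySem.List.insertBy pvBefore x (y :: ys) = x :: y :: ys by
          simp [PySem.List.insertBy, hxy]]
      refine List.pairwise_cons.mpr ⟨?_, List.pairwise_cons.mpr h⟩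
      intro z hz
      rcases List.mem_cons.mp hz with rfl | hz
      · exact pvBefore_asymm x z hxy
      · exact pvBefore_negtrans x y z (pvBefore_asymm x y hxy) (h.1 z hz)
    · rw [show PySem.List.insertBy pvBefore x (y :: ys)
          = y :: PySem.List.insertBy pvBefore x ys by
          simp [PySem.List.insertBy, hxy]]
      refine List.pairwise_cons.mpr ⟨?_, ih h.2⟩
      intro z hz
      rcases (PySem.List.mem_insertBy pvBefore x z ys).mp hz with rfl | hz
      · exact Bool.eq_false_iff.mpr (fun hc => hxy hc)
      · exact h.1 z hz

theorem pv_sorted2_pairwise (xs : List (Int × Int)) :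
    ((PySem.List.sorted2 xs Prod.fst Prod.snd).map Prod.fst).Pairwise (· ≤ ·) := by
  have hpw : (PySem.List.sorted2 xs Prod.fst Prod.snd).Pairwise
      (fun a b => pvBefore b a = false) := by
    have hrepr : PySem.List.sorted2 xs Prod.fst Prod.snd
        = xs.foldl (fun acc x => PySem.List.insertBy pvBefore x acc) [] := rfl
    rw [hrepr]
    have : ∀ (l : List (Int × Int)) (acc : List (Int × Int)),
        acc.Pairwise (fun a b => pvBefore b a = false) →
        (l.foldl (fun acc x => PySem.List.insertBy pvBefore x acc) acc).Pairwise
          (fun a b => pvBefore b a = false) := by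
      intro l
      induction l with
      | nil => exact fun acc h => h
      | cons x l ih => exact fun acc h => ih _ (pv_insertBy_pairwise x acc h)
    exact this xs [] (by simp)
  exact List.pairwise_map.mpr (hpw.imp (fun {a b} h => by
    simp [pvBefore] at h; omega))

theorem pv_main (buildings : List (List Int)) :
    averageHeightOfBuildings buildings = averageHeightOfBuildings_alt buildings := by
  set sevs := PySem.List.sorted2 (pvEventsA buildings) Prod.fst Prod.snd with hsevs
  have hperm : sevs.Perm (pvEventsA buildings) := PySem.List.sorted2_perm _ _ _ _
  have hpw : (sevs.map Prod.fst).Pairwise (· ≤ ·) := pv_sorted2_pairwise _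
  have hppos := pv_pairwise_posList sevs hpw
  -- B's position list is the position list of the sorted events
  have hcoords : PySem.List.sorted (pvDeltasB buildings).keys (fun x => x) = pvPosList sevs := by
    apply PySem.List.sorted_eq_of_perm_of_pairwise_lt
    · refine (List.perm_ext_iff_of_nodup ?_ ?_).mpr ?_
      · exact hppos.imp (fun {a b} h => ne_of_lt h)
      · rw [pvDeltasB_eq]; exact pvDeltaFold_nodup_keys _
      · intro x
        rw [pv_mem_posList, pvDeltasB_eq, pvDeltaFold_mem_keys]
        rw [PySem.Dict.keys_empty]
        rw [← pvEventsA_eq, (hperm.map Prod.fst).mem_iff]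
        simp
    · exact hppos
  -- B's per-position deltas are the per-position sums over the sorted events
  have hD : ∀ k, (pvDeltasB buildings).getD k (0, 0)
      = (pvS (sevs.filter (fun e => e.1 = k)), pvC (sevs.filter (fun e => e.1 = k))) := by
    intro k
    rw [pvDeltasB_eq, pvDeltaFold_getD, PySem.Dict.getD_empty]
    rw [← pvEventsA_eq]
    have hSk : pvS ((pvEventsA buildings).filter (fun e => e.1 = k))
        = pvS (sevs.filter (fun e => e.1 = k)) :=
      (List.Perm.sum_eq ((hperm.filter _).map _)).symm
    have hCk : pvC ((pvEventsA buildings).filter (fun e => e.1 = k))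
        = pvC (sevs.filter (fun e => e.1 = k)) :=
      (List.Perm.sum_eq ((hperm.filter _).map _)).symm
    rw [hSk, hCk]; simp
  -- B = push-fold over the gap triples of the sorted events
  have hmemP : ∀ e ∈ sevs, e.1 ∈ ([] : List Int) ++ pvPosList sevs := by
    intro e he
    rw [List.nil_append, pv_mem_posList]
    exact List.mem_map_of_mem he
  have hBsegs := pvBGaps_eq sevs (fun k => (pvDeltasB buildings).getD k (0, 0)) hD
    (pvPosList sevs) [] 0 0 [] (by simpa using hppos) hmemP (by simp [pvS]) (by simp [pvC])
  have hB : averageHeightOfBuildings_alt buildings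
      = (pvTriples sevs ((pvPosList sevs).zip (pvPosList sevs).tail)).foldl
          (fun r t => pvPushA r t.1 t.2.1 t.2.2) [] := by
    simp only [averageHeightOfBuildings_alt]
    rw [hcoords]
    have hstep : pvGapStepB (pvDeltasB buildings)
        = (fun (st : Int × Int × List (List Int)) (g : Int × Int) =>
            let d := (pvDeltasB buildings).getD g.1 (0, 0)
            let total := st.1 + d.1
            let count := st.2.1 + d.2
            (total, count,
              if count > 0 then st.2.2 ++ [[g.1, g.2, PySem.Int.floordiv total count]]
              else st.2.2)) := rfl
    rw [hstep, hBsegs, List.nil_append, pvMerge_eq_push]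
  have hA : averageHeightOfBuildings buildings = pvWalkGaps sevs 0 0 0 [] := by
    unfold averageHeightOfBuildings
    exact pvWalkGaps_eq_foldl sevs.length sevs (le_refl _) 0 0 0 []
  rw [hA, hB, ← pvGapLoop_eq_push]
  clear_value sevs
  clear hsevs hcoords hB hA hperm hD hBsegs hmemP hppos
  rcases sevs with _ | ⟨⟨p, d⟩, t⟩
  · simp [pvWalkGaps, pvPosList, pvGapLoop]
  · have hsplit := List.takeWhile_append_dropWhile (p := fun e => e.1 == p) (l := t)
    set tw := t.takeWhile (fun e => e.1 == p) with htw
    set dw := t.dropWhile (fun e => e.1 == p) with hdw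
    have hpwt : (t.map Prod.fst).Pairwise (· ≤ ·) :=
      (List.pairwise_cons.mp (by simpa using hpw)).2
    have hget : ∀ x ∈ t, p ≤ x.1 := fun x hx =>
      (List.pairwise_cons.mp (by simpa using hpw)).1 x.1 (List.mem_map_of_mem hx)
    have hgt : ∀ e ∈ dw, p < e.1 := by
      rw [hdw]; exact pv_dropWhile_gt p t hpwt hget
    have hdone : ∀ e ∈ (p, d) :: tw, e.1 ≤ p := by
      intro e he
      rcases List.mem_cons.mp he with rfl | he
      · exact le_refl _
      · exact le_of_eq (by simpa using List.mem_takeWhile_imp he)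
    have hpw' : ((((p, d) :: tw) ++ dw).map Prod.fst).Pairwise (· ≤ ·) := by
      rw [show ((p, d) :: tw) ++ dw = (p, d) :: t by simp [htw, hdw]]
      exact hpw
    rw [pvWalkGaps, ← htw, ← hdw]
    have hemit : pvEmit 0 0 0 p [] = [] := by simp [pvEmit]
    rw [hemit]
    have := pvWalkGaps_eq_gapLoop dw.length dw (le_refl _) ((p, d) :: tw)
      (0 + pvS ((p, d) :: tw)) (0 + pvC ((p, d) :: tw)) p [] hpw' hdone hgt
      (zero_add _) (zero_add _)
    rw [this, show ((p, d) :: tw) ++ dw = (p, d) :: t by simp [htw, hdw]]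
    rw [pvPosList, ← hdw, List.tail_cons]

-- ===== VERDICT (by name: the statement is the Claim_ definition above) =====
theorem averageHeightOfBuildings_spec : Claim_equal_averageHeightOfBuildings := by
  intro buildings _ _
  unfold Spec_averageHeightOfBuildings
  exact pv_main buildings
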